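-- pv_equiv track=rewrite | github.com/LolSayna/LearningPatternsfromTextualData | src/patternUtil.py | canonicalForm
-- ===== SOURCE A (Python) =====
-- def isVariable(i):
--     # as defined in the Int Array, an even number is a variable
--     return i % 2 == 0
--
-- def canonicalForm(pattern):
--     # transforms a pattern into its canonical form
--     # this is done by renaming each variable, depending on their occurence
--
--     conversion = {}
--     varCounter = 0
--
--     # a dictionary is created, so each time a variable occures it can be checked if it occured before
--     for i, c in enumerate(pattern):
--         if isVariable(c):
--
--             # if its in the dict a new variable name is already assigned
--             try:
--                 pattern[i] = conversion[c]
--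
--             # otherwise create one and raise the counter by 2, so the next even number can be used as variable
--             except KeyError:
--                 pattern[i] = conversion[c] = varCounter
--                 varCounter += 2
--
--     return pattern
-- ===== SOURCE B (Python) =====
-- def isVariable(i):
--     # as defined in the Int Array, an even number is a variable
--     return i % 2 == 0
--
-- def canonicalForm(pattern):
--     # Two-pass: first build the canonical mapping (distinct variables in
--     # first-occurrence order -> 0, 2, 4, ...), then rewrite pattern in place.
--     firsts = list(dict.fromkeys(c for c in pattern if isVariable(c)))
--     mapping = {c: 2 * i for i, c in enumerate(firsts)}
--     for i in range(len(pattern)):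
--         if isVariable(pattern[i]):
--             pattern[i] = mapping[pattern[i]]
--     return pattern
-- ===== Notes on version B (the rewrite author's own statement) =====
-- stated objective: alternative
-- what changed: Replaces A's single pass with try/except-driven incremental dict building by a two-pass table-first scheme: pass one collects the distinct variables in first-occurrence order and assigns canonical names 0,2,4,... up front, pass two rewrites each position by table lookup.
import Mathlib
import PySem

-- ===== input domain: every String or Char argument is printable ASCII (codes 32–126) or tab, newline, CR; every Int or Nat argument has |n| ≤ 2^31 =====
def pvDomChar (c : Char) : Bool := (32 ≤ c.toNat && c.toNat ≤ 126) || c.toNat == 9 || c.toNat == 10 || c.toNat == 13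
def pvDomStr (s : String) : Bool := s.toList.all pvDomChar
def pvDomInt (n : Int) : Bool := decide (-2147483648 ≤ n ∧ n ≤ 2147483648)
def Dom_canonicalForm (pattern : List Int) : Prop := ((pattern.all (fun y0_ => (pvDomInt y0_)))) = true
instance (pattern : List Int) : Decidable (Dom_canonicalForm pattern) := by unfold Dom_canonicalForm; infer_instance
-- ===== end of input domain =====

-- B replaces A's single try/except pass by a two-pass table-first scheme (collect distinct
-- variables, assign 0,2,4,..., then rewrite); both Pythons mutate `pattern` in place and
-- return the same list object — the equivalence proved here is about the returned value.


-- ===== PORT A =====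
def isVariable (i : Int) : Bool := PySem.Int.mod i 2 == 0

-- A's loop over enumerate(pattern): state = (conversion dict, varCounter); pattern[i] is
-- written at the position just read, so the rewritten list is built structurally.
def canonicalFormGo : List Int → PySem.Dict Int Int → Int → List Int
  | [], _, _ => []
  | c :: rest, conversion, varCounter =>
    if isVariable c then
      match conversion.get? c with
      | some v => v :: canonicalFormGo rest conversion varCounter          -- try: pattern[i] = conversion[c]
      | none => varCounter :: canonicalFormGo rest (conversion.insert c varCounter) (varCounter + 2)  -- except KeyError
    else c :: canonicalFormGo rest conversion varCounter

def canonicalForm (pattern : List Int) : List Int :=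
  canonicalFormGo pattern PySem.Dict.empty 0

-- ===== PORT B =====
def canonicalForm_alt (pattern : List Int) : List Int :=
  let firsts := PySem.List.dedup (pattern.filter (fun c => isVariable c))
  let mapping := (PySem.List.enumerate firsts).foldl (fun d q => d.insert q.2 (2 * q.1)) PySem.Dict.empty
  pattern.map (fun c => if isVariable c then (mapping.get? c).getD 0 else c)

-- ===== PRECONDITION & SPEC =====
def Spec_canonicalForm (pattern : List Int) (out : List Int) : Prop := out = canonicalForm_alt pattern
instance (pattern : List Int) (out : List Int) : Decidable (Spec_canonicalForm pattern out) := by unfold Spec_canonicalForm; infer_instance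

-- ===== CLAIM (what is proved, stated in full; the proofs are below) =====
def Claim_equal_canonicalForm : Prop := ∀ (pattern : List Int), Dom_canonicalForm pattern → Spec_canonicalForm pattern (canonicalForm pattern)

-- ===== LEMMAS AND PROOFS =====

-- the variables of p that are NOT yet in seen, in first-occurrence order
def newOf : List Int → List Int → List Int
  | [], _ => []
  | c :: rest, seen =>
    if isVariable c ∧ c ∉ seen then c :: newOf rest (seen ++ [c]) else newOf rest seen

-- the common pointwise rewriting function, parametrised by the first-occurrence list F
def rewriteBy (F : List Int) (c : Int) : Int :=
  if isVariable c then ((PySem.List.index? F c).map (fun i => 2 * (i : Int))).getD 0 else c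

lemma index?_append_singleton_of_ne {l : List Int} {x c : Int} (h : x ≠ c) :
    PySem.List.index? (l ++ [c]) x = PySem.List.index? l x := by
  induction l with
  | nil =>
    have hcx : ¬c = x := fun e => h e.symm
    simp [PySem.List.index?_eq_idxOf?, List.idxOf?, List.findIdx?_cons, hcx]
  | cons a t ih =>
    by_cases hax : a = x
    · subst hax; rw [List.cons_append, PySem.List.index?_cons_self, PySem.List.index?_cons_self]
    · rw [List.cons_append, PySem.List.index?_cons_of_ne (t ++ [c]) hax,
        PySem.List.index?_cons_of_ne t hax, ih]

lemma index?_append_of_some {s : List Int} {c : Int} {i : Nat}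
    (h : PySem.List.index? s c = some i) (t : List Int) :
    PySem.List.index? (s ++ t) c = some i := by
  rcases (PySem.List.index?_eq_some_iff _ _ _).1 h with ⟨pre, suf, hs, hl, hn⟩
  exact (PySem.List.index?_eq_some_iff _ _ _).2 ⟨pre, suf ++ t, by simp [hs], hl, hn⟩

lemma goA_eq (p : List Int) : ∀ (seen : List Int) (d : PySem.Dict Int Int)
    (_hd : ∀ x, d.get? x = (PySem.List.index? seen x).map (fun i => 2 * (i : Int))),
    canonicalFormGo p d (2 * (seen.length : Int)) =
      p.map (rewriteBy (seen ++ newOf p seen)) := by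
  induction p with
  | nil => intro seen d hd; simp [canonicalFormGo, newOf]
  | cons c rest ih =>
    intro seen d hd
    by_cases hv : isVariable c
    · by_cases hm : c ∈ seen
      · -- already assigned
        rcases Option.isSome_iff_exists.1 ((PySem.List.index?_isSome_iff _ _).2 hm) with ⟨i, hi⟩
        have hget : d.get? c = some (2 * (i : Int)) := by rw [hd, hi]; rfl
        have hnew : newOf (c :: rest) seen = newOf rest seen := by
          simp [newOf, hv, hm]
        simp only [canonicalFormGo, hv, if_true, hget]
        rw [ih seen d hd, hnew, List.map_cons]
        congr 1
        have hidx := index?_append_of_some hi (newOf rest seen)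
        unfold rewriteBy
        rw [if_pos hv, hidx]
        rfl
      · -- new variable
        have hnone : PySem.List.index? seen c = none := (PySem.List.index?_eq_none_iff _ _).2 hm
        have hget : d.get? c = none := by rw [hd, hnone]; rfl
        have hnew : newOf (c :: rest) seen = c :: newOf rest (seen ++ [c]) := by
          simp [newOf, hv, hm]
        simp only [canonicalFormGo, hv, if_true, hget]
        have hd' : ∀ x, (d.insert c (2 * (seen.length : Int))).get? x =
            (PySem.List.index? (seen ++ [c]) x).map (fun i => 2 * (i : Int)) := by
          intro x
          rw [PySem.Dict.get?_insert]
          by_cases hx : x = c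
          · subst hx
            rw [if_pos rfl, PySem.List.index?_append_singleton_self seen _ hm]
            rfl
          · rw [if_neg hx, index?_append_singleton_of_ne hx, hd]
        have hrec := ih (seen ++ [c]) (d.insert c (2 * (seen.length : Int))) hd'
        have hlen : 2 * (((seen ++ [c]).length : Nat) : Int) = 2 * (seen.length : Int) + 2 := by
          simp; ring
        rw [hlen] at hrec
        rw [hrec, hnew, List.map_cons]
        have hsc : seen ++ [c] ++ newOf rest (seen ++ [c]) =
            seen ++ (c :: newOf rest (seen ++ [c])) := by simp
        rw [hsc]
        congr 1
        have hfull : PySem.List.index? (seen ++ c :: newOf rest (seen ++ [c])) c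
            = some seen.length := by
          have h1 := PySem.List.index?_append_singleton_self seen c hm
          have h2 := index?_append_of_some h1 (newOf rest (seen ++ [c]))
          simpa using h2
        unfold rewriteBy
        rw [if_pos hv, hfull]
        rfl
    · have hnew : newOf (c :: rest) seen = newOf rest seen := by simp [newOf, hv]
      simp only [canonicalFormGo, hv, Bool.false_eq_true, if_false]
      rw [ih seen d hd, hnew, List.map_cons]
      congr 1
      simp [rewriteBy, hv]

lemma ofList_filter_eq_newOf (p : List Int) : ∀ (s : List Int),
    (p.filter (fun c => isVariable c)).foldl PySem.Set.add s = s ++ newOf p s := by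
  induction p with
  | nil => intro s; simp [newOf]
  | cons c rest ih =>
    intro s
    by_cases hv : isVariable c
    · by_cases hm : c ∈ s
      · have hadd : PySem.Set.add s c = s := by simp [PySem.Set.add, hm]
        simp [hv, newOf, hm, ih s]
      · have hadd : PySem.Set.add s c = s ++ [c] := by simp [PySem.Set.add, hm]
        simp [hv, newOf, hm, ih (s ++ [c])]
    · simp [hv, newOf, ih s]

lemma mapping_get? (c : Int) (F : List Int) : ∀ (d : PySem.Dict Int Int) (s : Int), F.Nodup →
    ((PySem.List.enumerate F s).foldl (fun d q => d.insert q.2 (2 * q.1)) d).get? c =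
      match PySem.List.index? F c with
      | some i => some (2 * (s + (i : Int)))
      | none => d.get? c := by
  induction F with
  | nil => intro d s _; simp [PySem.List.enumerate_nil, PySem.List.index?_eq_idxOf?, List.idxOf?]
  | cons a rest ih =>
    intro d s hnd
    rw [PySem.List.enumerate_cons, List.foldl_cons]
    have hrest : rest.Nodup := hnd.of_cons
    rw [ih (d.insert a (2 * s)) (s + 1) hrest]
    by_cases hac : a = c
    · subst hac
      have hnin : a ∉ rest := (List.nodup_cons.1 hnd).1
      rw [(PySem.List.index?_eq_none_iff _ _).2 hnin, PySem.List.index?_cons_self]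
      simp [PySem.Dict.get?_insert_self]
    · rw [PySem.List.index?_cons_of_ne rest hac]
      cases h : PySem.List.index? rest c with
      | some i => simp; ring
      | none =>
        have hca : ¬c = a := fun e => hac e.symm
        simp [PySem.Dict.get?_insert, hca]

-- ===== VERDICT (by name: the statement is the Claim_ definition above) =====
theorem canonicalForm_spec : Claim_equal_canonicalForm := by
  intro pattern _
  unfold Spec_canonicalForm canonicalForm canonicalForm_alt
  have hF : PySem.List.dedup (pattern.filter (fun c => isVariable c)) = newOf pattern [] := by
    rw [PySem.List.dedup_eq_ofList, PySem.Set.ofList_eq_foldl]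
    simpa using ofList_filter_eq_newOf pattern []
  have hnd : (newOf pattern []).Nodup := by
    rw [← hF]; exact PySem.List.nodup_dedup _
  have hA := goA_eq pattern [] PySem.Dict.empty (by
    intro x
    simp [PySem.Dict.get?_empty, PySem.List.index?_eq_idxOf?, List.idxOf?])
  simp only [List.length_nil, Nat.cast_zero, mul_zero, List.nil_append] at hA
  rw [hA, hF]
  apply List.map_congr_left
  intro c _
  by_cases hv : isVariable c
  · have hmg := mapping_get? c (newOf pattern []) PySem.Dict.empty 0 hnd
    cases h : PySem.List.index? (newOf pattern []) c with
    | some i =>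
      unfold rewriteBy
      rw [if_pos hv, if_pos hv, hmg, h]
      simp
    | none =>
      unfold rewriteBy
      rw [if_pos hv, if_pos hv, hmg, h]
      simp [PySem.Dict.get?_empty]
  · simp [rewriteBy, hv]
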